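-- pv_equiv track=rewrite | github.com/WenfeiY/Procodon | 12-Genome_encoding_space/01-Computing_encoding_space_from_GFF3.py | extract_incomplete_codon_region_list
-- ===== SOURCE A (Python) =====
-- def merge_ranges(
--     ranges: list
-- ):
--     """
--     Interval union
--
--     Parameter:
--         ranges: list containing intervals
--
--     Return:
--         merged: list after union
--     """
--
--     if not ranges:
--         return []
--
--     #  Sort the range list by positions
--     sorted_ranges = sorted(ranges, key=lambda x: x[0])
--
--     # Interval union
--     merged = [sorted_ranges[0].copy()]
--     for current in sorted_ranges[1:]:
--         last = merged[-1]
--         if current[0] <= last[1]: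
--             merged[-1][1] = max(last[1], current[1])
--         else:
--             merged.append(current.copy())
--     return merged
--
-- def extract_incomplete_codon_region(
--     cds_region: list,
--     phase: int,
--     strand: str
-- ):
--     """
--     Extract regions of incomplete codons caused by splicing from CDS region
--
--     Parameters:
--         cds_region: list containing start and end positions of CDS region
--             e.g. [100, 300]
--         phase: phase in integer (0, 1 or 2)
--         strand: sequence strand ('+' or '-'), str
--     Return:
--         ex_region: regions of incomplete codons, list
--     """
--
--     ex_region = []
--
--     if strand == '+':
--         if phase == 0:
--             ex_codon = (cds_region[1] - cds_region[0]) % 3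
--             if ex_codon == 0:
--                 return []
--             region2 = [cds_region[1] - ex_codon, cds_region[1] + (3 - ex_codon)]
--             return [region2]
--         region1 = [cds_region[0] - (3 - phase), cds_region[0] + phase]
--         region2 = [cds_region[1] - (cds_region[1] - (cds_region[0] + phase)) % 3, cds_region[1] + (3 - (cds_region[1] - (cds_region[0] + phase)) % 3)]
--         if not region1[0] == region1[1]:
--             ex_region.append(region1)
--         if not region2[0] == region2[1]:
--             ex_region.append(region2)
--         return ex_region
--     else:
--         if phase == 0:
--             ex_codon = (cds_region[1] - cds_region[0]) % 3
--             if ex_codon == 0: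
--                 return []
--             region2 = [cds_region[0] - (3 - ex_codon), cds_region[0] + ex_codon]
--             return [region2]
--         region1 = [cds_region[1] - phase, cds_region[1] + (3 - phase)]
--         region2 = [cds_region[0] - (3 - (cds_region[1] - cds_region[0] - phase) % 3), cds_region[0] + (cds_region[1] - cds_region[0] - phase) % 3]
--         if not region1[0] == region1[1]:
--             ex_region.append(region1)
--         if not region2[0] == region2[1]:
--             ex_region.append(region2)
--         return ex_region
--
-- def extract_incomplete_codon_region_list(
--     phase_dict: dict,
--     strand: str
-- ):
--     """
--     Extract regions of incomplete codons caused by splicing from CDS region list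
--
--     Parameters
--         phase_dict: dictionary containing CDS regions [start, end] with their phases as keys
--         strand: sequence strand ('+' or '-'), str
--
--     Return:
--         ex_region_list: region list of incomplete codons, list
--     """
--
--     ex_region_list = []
--     #  Parse all phases
--     for phase in phase_dict:
--         for cds_region in phase_dict[phase]:
--             ex_region_list += extract_incomplete_codon_region(cds_region, phase, strand)
--     ex_region_list = merge_ranges(ex_region_list)
--
--     return ex_region_list
-- ===== SOURCE B (Python) =====
-- def _incomplete_codon_bounds(region, phase, strand):
--     """(start, end) pairs of the incomplete-codon intervals of one CDS."""
--     s, e = region[0], region[1]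
--     if strand == '+':
--         if phase == 0:
--             r = (e - s) % 3
--             return [] if r == 0 else [(e - r, e + 3 - r)]
--         return [(s - 3 + phase, s + phase),
--                 (e - (e - s - phase) % 3, e + 3 - (e - s - phase) % 3)]
--     if phase == 0:
--         r = (e - s) % 3
--         return [] if r == 0 else [(s - 3 + r, s + r)]
--     return [(e - phase, e + 3 - phase),
--             (s - 3 + (e - s - phase) % 3, s + (e - s - phase) % 3)]
--
--
-- def extract_incomplete_codon_region_list(phase_dict, strand):
--     # Sweep line over integer-encoded events: an interval [s, e] becomes an
--     # open event 2*s and a close event 2*e + 1; sorting the encoded events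
--     # puts open events before close events at equal coordinates, so touching
--     # intervals merge.  A depth counter tracks how many intervals are open;
--     # a merged region is emitted each time the depth returns to zero.
--     events = []
--     for phase in phase_dict:
--         for region in phase_dict[phase]:
--             for s, e in _incomplete_codon_bounds(region, phase, strand):
--                 events.append(2 * s)
--                 events.append(2 * e + 1)
--     events.sort()
--     merged = []
--     depth = 0
--     open_start = 0
--     for ev in events:
--         if ev % 2 == 0:
--             if depth == 0:
--                 open_start = ev // 2
--             depth += 1
--         else:
--             depth -= 1
--             if depth == 0:
--                 merged.append([open_start, ev // 2])
--     return merged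
-- ===== Notes on version B (the rewrite author's own statement) =====
-- stated objective: alternative
-- what changed: A merges intervals by sorting them and linearly extending/appending a mutable last-merged interval; B is a sweep line: each incomplete-codon interval [s,e] becomes two integer-encoded events (2*s open, 2*e+1 close), the events are sorted so opens precede closes at equal coordinates, and a single pass maintains a depth counter, emitting a merged region whenever depth returns to zero.
import Mathlib
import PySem

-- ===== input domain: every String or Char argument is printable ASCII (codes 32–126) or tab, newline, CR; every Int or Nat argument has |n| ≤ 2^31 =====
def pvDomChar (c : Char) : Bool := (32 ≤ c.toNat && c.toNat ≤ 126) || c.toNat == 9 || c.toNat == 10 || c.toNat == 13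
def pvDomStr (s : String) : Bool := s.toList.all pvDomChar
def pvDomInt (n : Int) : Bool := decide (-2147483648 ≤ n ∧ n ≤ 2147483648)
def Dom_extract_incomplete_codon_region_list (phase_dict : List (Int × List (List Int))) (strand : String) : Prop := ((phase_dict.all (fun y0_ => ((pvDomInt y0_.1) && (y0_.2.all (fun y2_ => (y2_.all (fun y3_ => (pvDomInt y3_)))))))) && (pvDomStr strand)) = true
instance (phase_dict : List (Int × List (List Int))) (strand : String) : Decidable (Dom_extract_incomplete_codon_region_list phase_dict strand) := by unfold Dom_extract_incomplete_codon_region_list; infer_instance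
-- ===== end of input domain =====

-- B replaces A's sort-then-extend interval merge by a sweep line over integer-encoded
-- open/close events with a depth counter (objective: alternative algorithm, same cost).

-- ===== PORT A =====
-- helper extract_incomplete_codon_region; cds_region[0]/[1] via pyGet? (in range under Pre_)
def extract_incomplete_codon_region (cds_region : List Int) (phase : Int) (strand : String) : List (List Int) :=
  let c0 := (PySem.List.pyGet? cds_region 0).getD 0
  let c1 := (PySem.List.pyGet? cds_region 1).getD 0
  if strand == "+" then
    if phase == 0 then
      let ex_codon := PySem.Int.mod (c1 - c0) 3
      if ex_codon == 0 then []
      else [[c1 - ex_codon, c1 + (3 - ex_codon)]]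
    else
      let region1 := [c0 - (3 - phase), c0 + phase]
      let region2 := [c1 - PySem.Int.mod (c1 - (c0 + phase)) 3, c1 + (3 - PySem.Int.mod (c1 - (c0 + phase)) 3)]
      (if (PySem.List.pyGet? region1 0).getD 0 == (PySem.List.pyGet? region1 1).getD 0 then [] else [region1]) ++
      (if (PySem.List.pyGet? region2 0).getD 0 == (PySem.List.pyGet? region2 1).getD 0 then [] else [region2])
  else
    if phase == 0 then
      let ex_codon := PySem.Int.mod (c1 - c0) 3
      if ex_codon == 0 then []
      else [[c0 - (3 - ex_codon), c0 + ex_codon]]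
    else
      let region1 := [c1 - phase, c1 + (3 - phase)]
      let region2 := [c0 - (3 - PySem.Int.mod (c1 - c0 - phase) 3), c0 + PySem.Int.mod (c1 - c0 - phase) 3]
      (if (PySem.List.pyGet? region1 0).getD 0 == (PySem.List.pyGet? region1 1).getD 0 then [] else [region1]) ++
      (if (PySem.List.pyGet? region2 0).getD 0 == (PySem.List.pyGet? region2 1).getD 0 then [] else [region2])

-- helper merge_ranges: sort by x[0], then left-to-right merge mutating merged[-1][1]
def merge_ranges (ranges : List (List Int)) : List (List Int) :=
  match PySem.List.sorted ranges (fun x => (PySem.List.pyGet? x 0).getD 0) false with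
  | [] => []
  | first :: rest =>
    rest.foldl (fun merged current =>
      let last := merged.getLastD []
      if (PySem.List.pyGet? current 0).getD 0 ≤ (PySem.List.pyGet? last 1).getD 0 then
        merged.dropLast ++ [[(PySem.List.pyGet? last 0).getD 0,
                             max ((PySem.List.pyGet? last 1).getD 0) ((PySem.List.pyGet? current 1).getD 0)]]
      else merged ++ [current]) [first]

-- Python iterates the dict's keys and looks each one up; with unique keys (what a Python dict guarantees,
-- stated in Pre_) this is exactly iteration over the (key, value) items in insertion order.
def extract_incomplete_codon_region_list (phase_dict : List (Int × List (List Int))) (strand : String) : List (List Int) :=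
  merge_ranges (phase_dict.foldl (fun acc kv =>
    kv.2.foldl (fun acc cds_region => acc ++ extract_incomplete_codon_region cds_region kv.1 strand) acc) [])

-- ===== PORT B =====
-- _incomplete_codon_bounds: the (start, end) pairs of the incomplete-codon intervals of one CDS
def pvBounds (region : List Int) (phase : Int) (strand : String) : List (Int × Int) :=
  let s := (PySem.List.pyGet? region 0).getD 0
  let e := (PySem.List.pyGet? region 1).getD 0
  if strand == "+" then
    if phase == 0 then
      let r := PySem.Int.mod (e - s) 3
      if r == 0 then [] else [(e - r, e + 3 - r)]
    else [(s - 3 + phase, s + phase),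
          (e - PySem.Int.mod (e - s - phase) 3, e + 3 - PySem.Int.mod (e - s - phase) 3)]
  else
    if phase == 0 then
      let r := PySem.Int.mod (e - s) 3
      if r == 0 then [] else [(s - 3 + r, s + r)]
    else [(e - phase, e + 3 - phase),
          (s - 3 + PySem.Int.mod (e - s - phase) 3, s + PySem.Int.mod (e - s - phase) 3)]

-- the body of Source B's sweep loop: open event (even) bumps depth, close event (odd) emits on depth 0
def pvSweepStep (st : List (List Int) × Int × Int) (ev : Int) : List (List Int) × Int × Int :=
  if PySem.Int.mod ev 2 = 0 then
    (st.1, st.2.1 + 1, if st.2.1 = 0 then PySem.Int.floordiv ev 2 else st.2.2)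
  else
    (if st.2.1 - 1 = 0 then st.1 ++ [[st.2.2, PySem.Int.floordiv ev 2]] else st.1,
     st.2.1 - 1, st.2.2)

def extract_incomplete_codon_region_list_alt (phase_dict : List (Int × List (List Int))) (strand : String) : List (List Int) :=
  let events := phase_dict.foldl (fun acc kv =>
    kv.2.foldl (fun acc region =>
      (pvBounds region kv.1 strand).foldl (fun acc se => acc ++ [2 * se.1, 2 * se.2 + 1]) acc) acc) []
  ((PySem.List.sorted events (fun x => x) false).foldl pvSweepStep ([], 0, 0)).1

-- ===== PRECONDITION & SPEC =====
-- Pre_ excludes CDS regions with fewer than 2 coordinates (Python A raises IndexError there) and association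
-- lists with duplicate keys (not representable as the Python dict argument A receives).
def Pre_extract_incomplete_codon_region_list (phase_dict : List (Int × List (List Int))) (strand : String) : Prop :=
  (phase_dict.map Prod.fst).Nodup ∧ ∀ kv ∈ phase_dict, ∀ r ∈ kv.2, 2 ≤ r.length
instance (phase_dict : List (Int × List (List Int))) (strand : String) : Decidable (Pre_extract_incomplete_codon_region_list phase_dict strand) := by unfold Pre_extract_incomplete_codon_region_list; infer_instance
def pvWitness_extract_incomplete_codon_region_list : (List (Int × List (List Int))) × String :=
  ([(0, [[1, 4]]), (2, [[10, 20]])], "+")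
def Spec_extract_incomplete_codon_region_list (phase_dict : List (Int × List (List Int))) (strand : String) (out : List (List Int)) : Prop := out = extract_incomplete_codon_region_list_alt phase_dict strand
instance (phase_dict : List (Int × List (List Int))) (strand : String) (out : List (List Int)) : Decidable (Spec_extract_incomplete_codon_region_list phase_dict strand out) := by unfold Spec_extract_incomplete_codon_region_list; infer_instance

-- ===== CLAIM (what is proved, stated in full; the proofs are below) =====
def Claim_equal_extract_incomplete_codon_region_list : Prop := ∀ (phase_dict : List (Int × List (List Int))) (strand : String), Dom_extract_incomplete_codon_region_list phase_dict strand → Pre_extract_incomplete_codon_region_list phase_dict strand → Spec_extract_incomplete_codon_region_list phase_dict strand (extract_incomplete_codon_region_list phase_dict strand)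

-- ===== LEMMAS AND PROOFS =====

-- an incomplete-codon region with start a is exactly [a, a + 3]
def pvI3 (a : Int) : List Int := [a, a + 3]

-- start coordinates of the regions A collects for one CDS (proof-side mirror of both ports' branches)
def pvRegStarts (strand : String) (phase : Int) (region : List Int) : List Int :=
  let s := (PySem.List.pyGet? region 0).getD 0
  let e := (PySem.List.pyGet? region 1).getD 0
  if strand == "+" then
    if phase == 0 then
      (if PySem.Int.mod (e - s) 3 == 0 then [] else [e - PySem.Int.mod (e - s) 3])
    else [s - (3 - phase), e - PySem.Int.mod (e - s - phase) 3]
  else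
    if phase == 0 then
      (if PySem.Int.mod (e - s) 3 == 0 then [] else [s - (3 - PySem.Int.mod (e - s) 3)])
    else [e - phase, s - (3 - PySem.Int.mod (e - s - phase) 3)]

-- the flattened list of all collected start coordinates
def pvSL (phase_dict : List (Int × List (List Int))) (strand : String) : List Int :=
  phase_dict.foldl (fun l kv => kv.2.foldl (fun l r => l ++ pvRegStarts strand kv.1 r) l) []

-- merged-run grouping of a nondecreasing start list (prev start p, run start rs)
def pvGroupAux (runStart prev : Int) (xs : List Int) : List (List Int) :=
  match xs with
  | [] => [[runStart, prev + 3]]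
  | x :: rest =>
    if x ≤ prev + 3 then pvGroupAux runStart x rest
    else [runStart, prev + 3] :: pvGroupAux x x rest

-- encoded events of a start list: [2a, 2a+7] per start a (end = a+3)
def pvEvs (l : List Int) : List Int := l.flatMap (fun a => [2 * a, 2 * a + 7])

-- merge of the sorted open-event stream of xs and the sorted close-event stream of es
def pvEvMerge : List Int → List Int → List Int
  | [], es => es.map (fun a => 2 * a + 7)
  | x :: xs, [] => 2 * x :: pvEvMerge xs []
  | x :: xs, e :: es =>
    if 2 * x ≤ 2 * e + 7 then 2 * x :: pvEvMerge xs (e :: es)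
    else (2 * e + 7) :: pvEvMerge (x :: xs) es
termination_by xs es => xs.length + es.length

lemma pvPg0 (a b : Int) : (PySem.List.pyGet? [a, b] 0).getD 0 = a := by
  simp [PySem.List.pyGet?, PySem.List.pyIdx?]
lemma pvPg1 (a b : Int) : (PySem.List.pyGet? [a, b] 1).getD 0 = b := by
  simp [PySem.List.pyGet?, PySem.List.pyIdx?]

lemma region_eq (r : List Int) (p : Int) (strand : String) :
    extract_incomplete_codon_region r p strand = (pvRegStarts strand p r).map pvI3 := by
  unfold extract_incomplete_codon_region pvRegStarts
  set s := (PySem.List.pyGet? r 0).getD 0 with hs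
  set e := (PySem.List.pyGet? r 1).getD 0 with he
  have h1 : e - (s + p) = e - s - p := by ring
  simp only [h1]
  split_ifs <;> simp_all [pvI3, PySem.List.pyGet?, PySem.List.pyIdx?] <;> omega

lemma collectA_inner (regs : List (List Int)) (p : Int) (strand : String) : ∀ (sl : List Int),
    regs.foldl (fun acc r => acc ++ extract_incomplete_codon_region r p strand) (sl.map pvI3)
    = (regs.foldl (fun l r => l ++ pvRegStarts strand p r) sl).map pvI3 := by
  induction regs with
  | nil => intro sl; rfl
  | cons r rest ih =>
    intro sl
    rw [List.foldl_cons, List.foldl_cons, region_eq, ← List.map_append, ih]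

lemma collectA (pd : List (Int × List (List Int))) (strand : String) : ∀ (sl : List Int),
    pd.foldl (fun acc kv =>
      kv.2.foldl (fun acc cds_region => acc ++ extract_incomplete_codon_region cds_region kv.1 strand) acc) (sl.map pvI3)
    = (pd.foldl (fun l kv => kv.2.foldl (fun l r => l ++ pvRegStarts strand kv.1 r) l) sl).map pvI3 := by
  induction pd with
  | nil => intro sl; rfl
  | cons kv rest ih =>
    intro sl
    rw [List.foldl_cons, List.foldl_cons, collectA_inner, ih]

-- B-side collection: bounds are (a, a+3) over the same start list
lemma bounds_eq (r : List Int) (p : Int) (strand : String) :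
    pvBounds r p strand = (pvRegStarts strand p r).map (fun a => (a, a + 3)) := by
  unfold pvBounds pvRegStarts
  split_ifs <;> simp_all [Prod.mk.injEq] <;> try omega
  all_goals split_ifs <;> simp_all <;> omega

lemma pvEvs_append (l1 l2 : List Int) : pvEvs (l1 ++ l2) = pvEvs l1 ++ pvEvs l2 := by
  simp [pvEvs]

lemma events_of_bounds (l : List Int) : ∀ (acc : List Int),
    (l.map (fun a => (a, a + 3))).foldl (fun acc se => acc ++ [2 * se.1, 2 * se.2 + 1]) acc
    = acc ++ pvEvs l := by
  induction l with
  | nil => intro acc; simp [pvEvs]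
  | cons a t ih =>
    intro acc
    rw [List.map_cons, List.foldl_cons, ih]
    have : (2 : Int) * (a + 3) + 1 = 2 * a + 7 := by ring
    simp [pvEvs, this]

lemma collectB_inner (regs : List (List Int)) (p : Int) (strand : String) : ∀ (sl : List Int),
    regs.foldl (fun acc r => (pvBounds r p strand).foldl (fun acc se => acc ++ [2 * se.1, 2 * se.2 + 1]) acc) (pvEvs sl)
    = pvEvs (regs.foldl (fun l r => l ++ pvRegStarts strand p r) sl) := by
  induction regs with
  | nil => intro sl; rfl
  | cons r rest ih =>
    intro sl
    rw [List.foldl_cons, List.foldl_cons, bounds_eq, events_of_bounds, ← pvEvs_append, ih]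

lemma collectB (pd : List (Int × List (List Int))) (strand : String) : ∀ (sl : List Int),
    pd.foldl (fun acc kv =>
      kv.2.foldl (fun acc region => (pvBounds region kv.1 strand).foldl (fun acc se => acc ++ [2 * se.1, 2 * se.2 + 1]) acc) acc) (pvEvs sl)
    = pvEvs (pd.foldl (fun l kv => kv.2.foldl (fun l r => l ++ pvRegStarts strand kv.1 r) l) sl) := by
  induction pd with
  | nil => intro sl; rfl
  | cons kv rest ih =>
    intro sl
    rw [List.foldl_cons, List.foldl_cons, collectB_inner, ih]

-- the merge stream is a permutation of all open events followed by all close events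
lemma pvEvMerge_perm (xs es : List Int) :
    (pvEvMerge xs es).Perm (xs.map (fun a => 2 * a) ++ es.map (fun a => 2 * a + 7)) := by
  fun_induction pvEvMerge with
  | case1 es => simp
  | case2 x xs ih => simpa using ih.cons (2 * x)
  | case3 x xs e es h ih =>
    simpa using ih.cons (2 * x)
  | case4 x xs e es h ih =>
    refine (ih.cons (2 * e + 7)).trans ?_
    simpa using (List.perm_middle (a := 2 * e + 7)
      (l₁ := (x :: xs).map (fun a => 2 * a)) (l₂ := es.map (fun a => 2 * a + 7))).symm

lemma mem_pvEvMerge {xs es : List Int} {z : Int} (hz : z ∈ pvEvMerge xs es) :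
    (∃ a ∈ xs, z = 2 * a) ∨ (∃ e ∈ es, z = 2 * e + 7) := by
  have := (pvEvMerge_perm xs es).mem_iff.mp hz
  rcases List.mem_append.mp this with h | h
  · rcases List.mem_map.mp h with ⟨a, ha, rfl⟩; exact Or.inl ⟨a, ha, rfl⟩
  · rcases List.mem_map.mp h with ⟨e, he, rfl⟩; exact Or.inr ⟨e, he, rfl⟩

-- merging two sorted streams yields a sorted event list
lemma pvEvMerge_pairwise (xs es : List Int) (hxs : xs.Pairwise (· ≤ ·)) (hes : es.Pairwise (· ≤ ·)) :
    (pvEvMerge xs es).Pairwise (· ≤ ·) := by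
  fun_induction pvEvMerge with
  | case1 es =>
    exact List.pairwise_map.mpr (hes.imp (fun h => by omega))
  | case2 x xs ih =>
    rcases List.pairwise_cons.mp hxs with ⟨hx, hxs'⟩
    refine List.pairwise_cons.mpr ⟨?_, ih hxs' hes⟩
    intro z hz
    rcases mem_pvEvMerge hz with ⟨a, ha, rfl⟩ | ⟨e, he, rfl⟩
    · have := hx a ha; omega
    · simp at he
  | case3 x xs e es h ih =>
    rcases List.pairwise_cons.mp hxs with ⟨hx, hxs'⟩
    rcases List.pairwise_cons.mp hes with ⟨he, _⟩
    refine List.pairwise_cons.mpr ⟨?_, ih hxs' hes⟩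
    intro z hz
    rcases mem_pvEvMerge hz with ⟨a, ha, rfl⟩ | ⟨e', he', rfl⟩
    · have := hx a ha; omega
    · rcases List.mem_cons.mp he' with rfl | h'
      · omega
      · have := he e' h'; omega
  | case4 x xs e es h ih =>
    rcases List.pairwise_cons.mp hes with ⟨he, hes'⟩
    refine List.pairwise_cons.mpr ⟨?_, ih hxs hes'⟩
    intro z hz
    rcases mem_pvEvMerge hz with ⟨a, ha, rfl⟩ | ⟨e', he', rfl⟩
    · rcases List.mem_cons.mp ha with rfl | h'
      · omega
      · have := (List.pairwise_cons.mp hxs).1 a h'; omega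
    · have := he e' he'; omega

lemma pvEvs_perm (l : List Int) :
    (pvEvs l).Perm (l.map (fun a => 2 * a) ++ l.map (fun a => 2 * a + 7)) := by
  induction l with
  | nil => simp [pvEvs]
  | cons a t ih =>
    simp only [pvEvs] at ih ⊢
    simp only [List.flatMap_cons, List.map_cons, List.cons_append]
    exact ((ih.cons (2 * a + 7)).trans List.perm_middle.symm).cons (2 * a)

-- the sorted event list IS the merge of the two streams over the sorted start list
lemma sorted_events (SL : List Int) :
    PySem.List.sorted (pvEvs SL) (fun x => x) false
    = pvEvMerge (PySem.List.sorted SL (fun x => x) false) (PySem.List.sorted SL (fun x => x) false) := by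
  set ss := PySem.List.sorted SL (fun x => x) false with hss
  have hperm : (pvEvMerge ss ss).Perm (pvEvs SL) := by
    have hp2 : (ss.map (fun a => 2 * a) ++ ss.map (fun a => 2 * a + 7)).Perm
        (SL.map (fun a => 2 * a) ++ SL.map (fun a => 2 * a + 7)) :=
      List.Perm.append ((PySem.List.sorted_perm ..).map _) ((PySem.List.sorted_perm ..).map _)
    exact (pvEvMerge_perm ss ss).trans (hp2.trans (pvEvs_perm SL).symm)
  have hpair : ss.Pairwise (· ≤ ·) := by
    simpa using PySem.List.sorted_pairwise SL (fun x => x)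
  exact PySem.List.sorted_id_eq_of_perm_of_pairwise (pvEvs SL) (pvEvMerge ss ss) hperm
    (pvEvMerge_pairwise ss ss hpair hpair)

-- decoding the two event shapes through the sweep step
lemma pvSweepStep_open (st : List (List Int) × Int × Int) (a : Int) :
    pvSweepStep st (2 * a) = (st.1, st.2.1 + 1, if st.2.1 = 0 then a else st.2.2) := by
  have h1 : PySem.Int.mod (2 * a) 2 = 0 := by
    rw [PySem.Int.mod_eq_emod_of_pos (by norm_num)]; omega
  have h2 : PySem.Int.floordiv (2 * a) 2 = a := by
    rw [PySem.Int.floordiv_eq_ediv_of_pos (by norm_num)]; omega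
  unfold pvSweepStep
  rw [h1, h2, if_pos rfl]

lemma pvSweepStep_close (st : List (List Int) × Int × Int) (a : Int) :
    pvSweepStep st (2 * a + 7)
    = (if st.2.1 - 1 = 0 then st.1 ++ [[st.2.2, a + 3]] else st.1, st.2.1 - 1, st.2.2) := by
  have h1 : PySem.Int.mod (2 * a + 7) 2 = 1 := by
    rw [PySem.Int.mod_eq_emod_of_pos (by norm_num)]; omega
  have h2 : PySem.Int.floordiv (2 * a + 7) 2 = a + 3 := by
    rw [PySem.Int.floordiv_eq_ediv_of_pos (by norm_num)]; omega
  unfold pvSweepStep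
  rw [h1, h2, if_neg (by omega)]

-- the sweep over the merged events of a run structure equals run grouping:
-- os = opened-not-closed starts (sorted, nonempty, last = p), xs = not-yet-opened starts
lemma sweep_aux (n : Nat) : ∀ (xs os : List Int) (acc : List (List Int)) (rs p : Int),
    2 * xs.length + os.length ≤ n →
    (os ++ xs).Pairwise (· ≤ ·) → os ≠ [] → os.getLast? = some p →
    ((pvEvMerge xs (os ++ xs)).foldl pvSweepStep (acc, (os.length : Int), rs)).1
    = acc ++ pvGroupAux rs p xs := by
  induction n with
  | zero =>
    intro xs os acc rs p hm _ hne _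
    cases os with
    | nil => exact absurd rfl hne
    | cons o t => simp at hm
  | succ n ih =>
    intro xs os acc rs p hm hpw hne hlast
    cases os with
    | nil => exact absurd rfl hne
    | cons o os' =>
      cases xs with
      | nil =>
        rw [List.append_nil] at hpw ⊢
        rw [pvEvMerge, List.map_cons, List.foldl_cons, pvSweepStep_close]
        cases os' with
        | nil =>
          have hp : o = p := by simpa using hlast
          subst hp
          rw [if_pos (by simp)]
          simp [pvGroupAux]
        | cons o2 t =>
          rw [if_neg (by simp only [List.length_cons]; push_cast; omega)]
          have hc : ((o :: o2 :: t).length : Int) - 1 = ((o2 :: t).length : Int) := by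
            simp only [List.length_cons]; push_cast; ring
          rw [hc]
          have hlast2 : (o2 :: t).getLast? = some p := by
            rwa [List.getLast?_cons_cons] at hlast
          have h2 := ih [] (o2 :: t) acc rs p (by simp at hm ⊢; omega)
            (by rw [List.append_nil]; exact hpw.sublist (by simp)) (by simp) hlast2
          rw [List.append_nil, pvEvMerge] at h2
          exact h2
      | cons x xs' =>
        have hop : o ≤ p := by
          have hos : (o :: os').Pairwise (· ≤ ·) := hpw.sublist (by simp)
          have hpmem : p ∈ o :: os' := List.mem_of_getLast? hlast
          rcases List.mem_cons.mp hpmem with rfl | hpm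
          · omega
          · exact (List.pairwise_cons.mp hos).1 p hpm
        rw [List.cons_append, pvEvMerge]
        by_cases hcmp : 2 * x ≤ 2 * o + 7
        · rw [if_pos hcmp, List.foldl_cons, pvSweepStep_open,
              if_neg (show ¬(((o :: os').length : Int) = 0) by
                simp only [List.length_cons]; push_cast; omega)]
          have hxp3 : x ≤ p + 3 := by omega
          have hlen : ((o :: os').length : Int) + 1 = (((o :: os') ++ [x]).length : Int) := by
            simp only [List.length_append, List.length_cons, List.length_nil]; push_cast; ring
          rw [hlen]
          have hes : o :: (os' ++ x :: xs') = ((o :: os') ++ [x]) ++ xs' := by simp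
          rw [hes]
          have h2 := ih xs' ((o :: os') ++ [x]) acc rs x (by simp at hm ⊢; omega)
            (by simpa using hpw) (by simp) (by rw [List.getLast?_concat])
          rw [h2, pvGroupAux, if_pos hxp3]
        · rw [if_neg hcmp, List.foldl_cons, pvSweepStep_close]
          cases os' with
          | nil =>
            have hp : o = p := by simpa using hlast
            subst hp
            rw [if_pos (by simp), List.nil_append, pvEvMerge,
                if_pos (show 2 * x ≤ 2 * x + 7 by omega), List.foldl_cons, pvSweepStep_open,
                if_pos (by simp)]
            have hd : ((((o :: ([] : List Int)).length : Int) - 1) + 1)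
                = ((([x] : List Int)).length : Int) := by simp
            rw [hd]
            have h2 := ih xs' [x] (acc ++ [[rs, o + 3]]) x x (by simp at hm ⊢; omega)
              (hpw.sublist (by simp)) (by simp) (by simp)
            rw [List.singleton_append] at h2
            rw [h2, pvGroupAux, if_neg (show ¬ x ≤ o + 3 by omega)]
            simp
          | cons o2 t =>
            rw [if_neg (by simp only [List.length_cons]; push_cast; omega)]
            have hc : ((o :: o2 :: t).length : Int) - 1 = ((o2 :: t).length : Int) := by
              simp only [List.length_cons]; push_cast; ring
            rw [hc]
            have hlast2 : (o2 :: t).getLast? = some p := by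
              rwa [List.getLast?_cons_cons] at hlast
            have h2 := ih (x :: xs') (o2 :: t) acc rs p (by simp at hm ⊢; omega)
              (hpw.sublist (by simp)) (by simp) hlast2
            rw [List.cons_append] at h2
            exact h2

-- A's left-to-right scan over sorted length-3 intervals equals run grouping
lemma pvScanA (ss : List Int) : ∀ (done : List (List Int)) (rs p : Int),
    ss.Pairwise (· ≤ ·) → (∀ x ∈ ss, p ≤ x) →
    (ss.map pvI3).foldl (fun merged current =>
      let last := merged.getLastD []
      if (PySem.List.pyGet? current 0).getD 0 ≤ (PySem.List.pyGet? last 1).getD 0 then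
        merged.dropLast ++ [[(PySem.List.pyGet? last 0).getD 0,
                             max ((PySem.List.pyGet? last 1).getD 0) ((PySem.List.pyGet? current 1).getD 0)]]
      else merged ++ [current]) (done ++ [[rs, p + 3]])
    = done ++ pvGroupAux rs p ss := by
  induction ss with
  | nil => intro done rs p _ _; simp [pvGroupAux]
  | cons x rest ih =>
    intro done rs p hs hp
    have hpx : p ≤ x := hp x (List.mem_cons_self ..)
    rw [List.map_cons, List.foldl_cons]
    simp only [pvI3, List.getLastD_concat, List.dropLast_concat, pvPg0, pvPg1]
    rw [pvGroupAux]
    rcases List.pairwise_cons.mp hs with ⟨hx, hrest⟩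
    by_cases hc : x ≤ p + 3
    · rw [if_pos hc, if_pos hc]
      have hmax : max (p + 3) (x + 3) = x + 3 := by omega
      rw [hmax]
      exact ih done rs x hrest hx
    · rw [if_neg hc, if_neg hc]
      have := ih (done ++ [[rs, p + 3]]) x x hrest hx
      rw [List.append_assoc] at this
      simpa [pvI3] using this

lemma sorted_map_i3 (sl : List Int) :
    PySem.List.sorted (sl.map pvI3) (fun x => (PySem.List.pyGet? x 0).getD 0) false
    = (PySem.List.sorted sl (fun x => x) false).map pvI3 := by
  set key : List Int → Int := fun x => (PySem.List.pyGet? x 0).getD 0 with hkey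
  set P := PySem.List.sorted (sl.map pvI3) key false with hP
  have hki : ∀ a, key (pvI3 a) = a := fun a => pvPg0 a (a + 3)
  have hperm : P.Perm (sl.map pvI3) := PySem.List.sorted_perm ..
  have hPmem : ∀ x ∈ P, x = pvI3 (key x) := by
    intro x hx
    rcases List.mem_map.mp (hperm.mem_iff.mp hx) with ⟨a, _, rfl⟩
    rw [hki]
  have hmapkey : (sl.map pvI3).map key = sl := by
    rw [List.map_map]
    calc sl.map (key ∘ pvI3) = sl.map id := List.map_congr_left (fun a _ => hki a)
    _ = sl := List.map_id sl
  have h2 : (P.map key).Perm sl := by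
    rw [← hmapkey]; exact hperm.map key
  have h3 : (P.map key).Pairwise (· ≤ ·) := PySem.List.sorted_map_key_pairwise ..
  have hSSperm : (PySem.List.sorted sl (fun x => x) false).Perm sl := PySem.List.sorted_perm ..
  have h4 : (PySem.List.sorted sl (fun x => x) false).Pairwise (· ≤ ·) :=
    PySem.List.sorted_pairwise ..
  have h5 : P.map key = PySem.List.sorted sl (fun x => x) false :=
    List.Perm.eq_of_pairwise' h3 h4 (h2.trans hSSperm.symm)
  calc P = P.map id := (List.map_id P).symm
  _ = P.map (pvI3 ∘ key) := List.map_congr_left (fun x hx => (hPmem x hx))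
  _ = (P.map key).map pvI3 := by rw [List.map_map]
  _ = (PySem.List.sorted sl (fun x => x) false).map pvI3 := by rw [h5]

-- ===== VERDICT (by name: the statement is the Claim_ definition above) =====
theorem extract_incomplete_codon_region_list_spec : Claim_equal_extract_incomplete_codon_region_list := by
  intro pd strand _ _
  unfold Spec_extract_incomplete_codon_region_list
  have hA : pd.foldl (fun acc kv =>
      kv.2.foldl (fun acc cds_region => acc ++ extract_incomplete_codon_region cds_region kv.1 strand) acc) []
      = (pvSL pd strand).map pvI3 := by
    have := collectA pd strand []
    simpa [pvSL] using this
  have hB : pd.foldl (fun acc kv =>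
      kv.2.foldl (fun acc region => (pvBounds region kv.1 strand).foldl (fun acc se => acc ++ [2 * se.1, 2 * se.2 + 1]) acc) acc) []
      = pvEvs (pvSL pd strand) := by
    have := collectB pd strand []
    simpa [pvSL, pvEvs] using this
  unfold extract_incomplete_codon_region_list extract_incomplete_codon_region_list_alt
  simp only [hA, hB, sorted_events]
  set SL := pvSL pd strand with hSL
  set ss := PySem.List.sorted SL (fun x => x) false with hss
  have hpair : ss.Pairwise (· ≤ ·) := by
    simpa using PySem.List.sorted_pairwise SL (fun x => x)
  unfold merge_ranges
  rw [sorted_map_i3, ← hss]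
  cases hc : ss with
  | nil => simp [pvEvMerge]
  | cons a t =>
    rw [hc] at hpair
    rcases List.pairwise_cons.mp hpair with ⟨hat, ht⟩
    have hAside := pvScanA t [] a a ht hat
    simp only [List.nil_append] at hAside
    rw [pvEvMerge, if_pos (show 2 * a ≤ 2 * a + 7 by omega), List.foldl_cons, pvSweepStep_open,
        if_pos rfl]
    have hz : (0 : Int) + 1 = ((([a] : List Int)).length : Int) := by simp
    rw [hz]
    have hBside := sweep_aux (2 * t.length + 1) t [a] [] a a (by simp)
      (by simpa using hpair) (by simp) (by simp)
    rw [List.singleton_append] at hBside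
    rw [hBside]
    simp only [List.map_cons, List.nil_append]
    simpa [pvI3] using hAside
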